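-- pv_equiv track=rewrite | github.com/Shivain-codes/multi-agent-task-management-system | app/agents/orchestrator.py | _build_workflow_summary
-- ===== SOURCE A (Python) =====
-- from typing import Optional, Dict, Any, List, Tuple
--
-- def _build_workflow_summary(
--     user_request: str, results: List[Dict[str, Any]]
-- ) -> str:
--     """Build a human-readable summary of the entire workflow."""
--     successful = [r for r in results if r.get("success")]
--     failed = [r for r in results if not r.get("success")]
--
--     lines = [f"Completed workflow for: '{user_request}'"]
--     lines.append(f"{len(successful)} agents succeeded, {len(failed)} failed.\n")
--
--     for r in successful:
--         lines.append(f"✓ {r['agent_name'].replace('_', ' ').title()}: {r.get('summary', '')}")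
--     for r in failed:
--         lines.append(f"✗ {r['agent_name'].replace('_', ' ').title()}: {r.get('error', 'Unknown error')}")
--
--     return "\n".join(lines)
-- ===== SOURCE B (Python) =====
-- from typing import Optional, Dict, Any, List, Tuple
--
-- def _build_workflow_summary(
--     user_request: str, results: List[Dict[str, Any]]
-- ) -> str:
--     """Stable sort by success flag (successes first), then one formatting loop."""
--     ordered = sorted(results, key=lambda r: not r.get("success"))
--     n_succ = sum(bool(r.get("success")) for r in results)
--     lines = [
--         f"Completed workflow for: '{user_request}'",
--         f"{n_succ} agents succeeded, {len(results) - n_succ} failed.\n",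
--     ]
--     for r in ordered:
--         name = r["agent_name"].replace("_", " ").title()
--         if r.get("success"):
--             lines.append(f"\u2713 {name}: {r.get('summary', '')}")
--         else:
--             lines.append(f"\u2717 {name}: {r.get('error', 'Unknown error')}")
--     return "\n".join(lines)
-- ===== Notes on version B (the rewrite author's own statement) =====
-- stated objective: alternative
-- what changed: B never partitions the results: it stably sorts them by the success flag (successes first, original order preserved), counts successes with a single comprehension-sum, and runs ONE formatting loop over the reordered list, whereas A builds two filtered sublists and formats each in its own loop.
import Mathlib
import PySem

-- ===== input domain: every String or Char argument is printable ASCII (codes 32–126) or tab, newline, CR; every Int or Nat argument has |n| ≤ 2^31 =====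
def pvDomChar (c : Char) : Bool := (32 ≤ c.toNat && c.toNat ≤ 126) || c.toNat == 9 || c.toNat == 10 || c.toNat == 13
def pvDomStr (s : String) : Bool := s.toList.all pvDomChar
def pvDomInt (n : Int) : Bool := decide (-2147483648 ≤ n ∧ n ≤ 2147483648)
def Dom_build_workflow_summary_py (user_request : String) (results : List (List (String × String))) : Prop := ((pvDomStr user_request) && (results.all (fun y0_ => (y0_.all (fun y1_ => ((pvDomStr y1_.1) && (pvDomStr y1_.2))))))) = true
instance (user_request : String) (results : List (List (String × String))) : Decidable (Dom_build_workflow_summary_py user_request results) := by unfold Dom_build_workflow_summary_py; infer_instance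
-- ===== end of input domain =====

-- B replaces A's partition-into-two-lists-plus-two-loops by a stable sort on the
-- success flag followed by a single formatting loop; same output.

-- ===== PORT A =====
-- shared formatting helpers (both Pythons contain the identical f-string expressions)

-- Python str.title(), exact on ASCII: a letter is uppercased iff the previous
-- character is not a letter (ASCII cased = alpha), otherwise lowercased.
def pvTitleChars : List Char → Bool → List Char
  | [], _ => []
  | c :: t, prevAlpha =>
      (if PySem.Chars.isalpha c then
        (if prevAlpha then PySem.Chars.lowerChar c else PySem.Chars.upperChar c)
      else c) :: pvTitleChars t (PySem.Chars.isalpha c)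

def pvTitle (s : String) : String := String.ofList (pvTitleChars s.toList false)

-- r['agent_name'] under Pre_ (key present; Python raises KeyError otherwise)
def pvAgentName (r : List (String × String)) : String :=
  (PySem.Dict.mk r).getD "agent_name" ""

-- truthiness of r.get("success") (missing key or empty string is falsy)
def pvSuccess (r : List (String × String)) : Bool :=
  !((PySem.Dict.mk r).getD "success" "" == "")

def pvSuccLine (r : List (String × String)) : String :=
  "✓ " ++ pvTitle (PySem.Str.replace (pvAgentName r) "_" " ") ++ ": " ++
    (PySem.Dict.mk r).getD "summary" ""

def pvFailLine (r : List (String × String)) : String :=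
  "✗ " ++ pvTitle (PySem.Str.replace (pvAgentName r) "_" " ") ++ ": " ++
    (PySem.Dict.mk r).getD "error" "Unknown error"

def build_workflow_summary_py (user_request : String) (results : List (List (String × String))) : String :=
  let successful := results.filter (fun r => pvSuccess r)
  let failed := results.filter (fun r => !pvSuccess r)
  let lines := ["Completed workflow for: '" ++ user_request ++ "'"]
  let lines := lines ++ [PySem.Int.toStr (PySem.List.len successful) ++ " agents succeeded, " ++
                         PySem.Int.toStr (PySem.List.len failed) ++ " failed.\n"]
  let lines := successful.foldl (fun acc r => acc ++ [pvSuccLine r]) lines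
  let lines := failed.foldl (fun acc r => acc ++ [pvFailLine r]) lines
  PySem.Str.join "\n" lines

-- ===== PORT B =====
-- the sort key 'not r.get("success")': Python bools order False < True, ported
-- exactly as the order-isomorphic Nat values 0 < 1
def pvKey (r : List (String × String)) : Nat := if pvSuccess r then 0 else 1

def build_workflow_summary_py_alt (user_request : String) (results : List (List (String × String))) : String :=
  let ordered := PySem.List.sorted results pvKey
  -- sum(bool(...) for r in results): Python sums bools as 0/1 integers
  let n_succ : Int := (results.map (fun r => if pvSuccess r then (1 : Int) else 0)).sum
  let lines := ["Completed workflow for: '" ++ user_request ++ "'",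
                PySem.Int.toStr n_succ ++ " agents succeeded, " ++
                PySem.Int.toStr (PySem.List.len results - n_succ) ++ " failed.\n"]
  let lines := ordered.foldl (fun acc r =>
      let name := pvTitle (PySem.Str.replace (pvAgentName r) "_" " ")
      if pvSuccess r then
        acc ++ ["✓ " ++ name ++ ": " ++ (PySem.Dict.mk r).getD "summary" ""]
      else
        acc ++ ["✗ " ++ name ++ ": " ++ (PySem.Dict.mk r).getD "error" "Unknown error"]) lines
  PySem.Str.join "\n" lines

-- ===== PRECONDITION & SPEC =====
-- Pre_ excludes exactly the inputs where Python A raises KeyError: a result dict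
-- without the 'agent_name' key.  (B raises there too.)
def Pre_build_workflow_summary_py (user_request : String) (results : List (List (String × String))) : Prop :=
  ∀ r ∈ results, "agent_name" ∈ r.map Prod.fst
instance (user_request : String) (results : List (List (String × String))) : Decidable (Pre_build_workflow_summary_py user_request results) := by unfold Pre_build_workflow_summary_py; infer_instance

def pvWitness_build_workflow_summary_py : String × (List (List (String × String))) :=
  ("deploy app", [[("agent_name", "code_writer"), ("success", "yes"), ("summary", "done")],
                  [("agent_name", "tester"), ("error", "timeout")]])

def Spec_build_workflow_summary_py (user_request : String) (results : List (List (String × String))) (out : String) : Prop := out = build_workflow_summary_py_alt user_request results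
instance (user_request : String) (results : List (List (String × String))) (out : String) : Decidable (Spec_build_workflow_summary_py user_request results out) := by unfold Spec_build_workflow_summary_py; infer_instance

-- ===== CLAIM (what is proved, stated in full; the proofs are below) =====
def Claim_equal_build_workflow_summary_py : Prop := ∀ (user_request : String) (results : List (List (String × String))), Dom_build_workflow_summary_py user_request results → Pre_build_workflow_summary_py user_request results → Spec_build_workflow_summary_py user_request results (build_workflow_summary_py user_request results)

-- ===== LEMMAS AND PROOFS =====

-- inserting a success into (successes ++ failures) puts it after the successes
theorem insertBy_succ (x : List (String × String)) (hx : pvSuccess x = true)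
    (s f : List (List (String × String)))
    (hs : ∀ y ∈ s, pvSuccess y = true) (hf : ∀ y ∈ f, pvSuccess y = false) :
    PySem.List.insertBy (fun a b => decide (pvKey a < pvKey b)) x (s ++ f) = s ++ x :: f := by
  induction s with
  | nil =>
      cases f with
      | nil => simp [PySem.List.insertBy]
      | cons y t =>
          have hy := hf y (by simp)
          simp [PySem.List.insertBy, pvKey, hx, hy]
  | cons a s' ih =>
      have ha := hs a (by simp)
      rw [List.cons_append,
        show PySem.List.insertBy (fun a b => decide (pvKey a < pvKey b)) x (a :: (s' ++ f))
              = a :: PySem.List.insertBy (fun a b => decide (pvKey a < pvKey b)) x (s' ++ f) from by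
          simp [PySem.List.insertBy, pvKey, hx, ha],
        ih (fun y hy => hs y (List.mem_cons_of_mem _ hy))]
      simp

-- inserting a failure appends it at the end
theorem insertBy_fail (x : List (String × String)) (hx : pvSuccess x = false)
    (l : List (List (String × String))) :
    PySem.List.insertBy (fun a b => decide (pvKey a < pvKey b)) x l = l ++ [x] := by
  apply PySem.List.insertBy_of_forall_not_before
  intro y _
  simp [pvKey, hx]
  split <;> omega

-- the stable insertion sort on the 2-valued key is the stable partition
theorem foldl_insertBy_partition (l s f : List (List (String × String)))
    (hs : ∀ y ∈ s, pvSuccess y = true) (hf : ∀ y ∈ f, pvSuccess y = false) :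
    l.foldl (fun acc x => PySem.List.insertBy (fun a b => decide (pvKey a < pvKey b)) x acc) (s ++ f)
      = (s ++ l.filter (fun r => pvSuccess r)) ++ (f ++ l.filter (fun r => !pvSuccess r)) := by
  induction l generalizing s f with
  | nil => simp
  | cons x t ih =>
      simp only [List.foldl_cons]
      by_cases hx : pvSuccess x = true
      · rw [insertBy_succ x hx s f hs hf]
        have : s ++ x :: f = (s ++ [x]) ++ f := by simp
        rw [this, ih (s ++ [x]) f
          (by intro y hy; rcases List.mem_append.1 hy with h | h
              · exact hs y h
              · simp at h; subst h; exact hx) hf]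
        simp [hx]
      · have hx' : pvSuccess x = false := by simpa using hx
        rw [show s ++ f = (s ++ f : List _) from rfl, insertBy_fail x hx',
          List.append_assoc, show f ++ [x] = f ++ [x] from rfl,
          ih s (f ++ [x]) hs
          (by intro y hy; rcases List.mem_append.1 hy with h | h
              · exact hf y h
              · simp at h; subst h; exact hx')]
        simp [hx']

theorem sorted_key_eq_partition (results : List (List (String × String))) :
    PySem.List.sorted results pvKey =
      results.filter (fun r => pvSuccess r) ++ results.filter (fun r => !pvSuccess r) := by
  rw [PySem.List.sorted_eq_foldl_insertBy]
  have h := foldl_insertBy_partition results [] [] (by simp) (by simp)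
  simpa using h

-- the 0/1 sum counts the successes
theorem sum_ite_eq_filter_length (l : List (List (String × String))) :
    (l.map (fun r => if pvSuccess r then (1 : Int) else 0)).sum =
      ((l.filter (fun r => pvSuccess r)).length : Int) := by
  induction l with
  | nil => simp
  | cons x t ih => by_cases hx : pvSuccess x = true <;> simp [hx, ih] <;> ring_nf

theorem filter_length_split (l : List (List (String × String))) :
    (l.length : Int) - ((l.filter (fun r => pvSuccess r)).length : Int) =
      ((l.filter (fun r => !pvSuccess r)).length : Int) := by
  have h : l.length = (l.filter (fun r => pvSuccess r)).length +
      (l.filter (fun r => !pvSuccess r)).length :=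
    List.length_eq_length_filter_add _
  omega

-- B's single formatting loop, restricted to all-success / all-failure segments,
-- is A's corresponding formatting loop
theorem foldB_eq_succ (l : List (List (String × String)))
    (h : ∀ r ∈ l, pvSuccess r = true) (init : List String) :
    l.foldl (fun acc r =>
        if pvSuccess r then
          acc ++ ["✓ " ++ pvTitle (PySem.Str.replace (pvAgentName r) "_" " ") ++ ": " ++
                    (PySem.Dict.mk r).getD "summary" ""]
        else
          acc ++ ["✗ " ++ pvTitle (PySem.Str.replace (pvAgentName r) "_" " ") ++ ": " ++
                    (PySem.Dict.mk r).getD "error" "Unknown error"]) init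
      = l.foldl (fun acc r => acc ++ [pvSuccLine r]) init :=
  PySem.List.foldl_congr_mem l _ _ init (fun acc x hx => by simp [pvSuccLine, h x hx])

theorem foldB_eq_fail (l : List (List (String × String)))
    (h : ∀ r ∈ l, pvSuccess r = false) (init : List String) :
    l.foldl (fun acc r =>
        if pvSuccess r then
          acc ++ ["✓ " ++ pvTitle (PySem.Str.replace (pvAgentName r) "_" " ") ++ ": " ++
                    (PySem.Dict.mk r).getD "summary" ""]
        else
          acc ++ ["✗ " ++ pvTitle (PySem.Str.replace (pvAgentName r) "_" " ") ++ ": " ++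
                    (PySem.Dict.mk r).getD "error" "Unknown error"]) init
      = l.foldl (fun acc r => acc ++ [pvFailLine r]) init :=
  PySem.List.foldl_congr_mem l _ _ init (fun acc x hx => by simp [pvFailLine, h x hx])

theorem build_workflow_summary_py_spec : Claim_equal_build_workflow_summary_py := by
  intro user_request results _dom _pre
  show build_workflow_summary_py user_request results =
        build_workflow_summary_py_alt user_request results
  unfold build_workflow_summary_py build_workflow_summary_py_alt
  rw [sorted_key_eq_partition, sum_ite_eq_filter_length]
  simp only [PySem.List.len_eq, filter_length_split]
  rw [List.foldl_append,
    foldB_eq_fail (results.filter (fun r => !pvSuccess r))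
      (fun r hr => by simpa using (List.mem_filter.1 hr).2),
    foldB_eq_succ (results.filter (fun r => pvSuccess r))
      (fun r hr => (List.mem_filter.1 hr).2)]
  simp

-- ===== VERDICT (by name: the statement is the Claim_ definition above) =====
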